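-- pv_equiv track=rewrite | github.com/yprakash/ypython | ds-n-algos/leetcode/1996.the-number-of-weak-characters-in-the-game.py | numberOfWeakCharacters1
-- ===== SOURCE A (Python) =====
-- def numberOfWeakCharacters1(properties):
--     weak = 0
--     properties.sort()
--
--     for i in range(len(properties)-1):
--         j = len(properties) - 1
--         while properties[i][0] < properties[j][0]:
--             if properties[i][1] < properties[j][1]:
--                 weak += 1
--                 break
--             j -= 1
--
--     return weak
-- ===== SOURCE B (Python) =====
-- def numberOfWeakCharacters1(properties):
--     # Alternative algorithm: sort by attack descending, defense ascending; one pass tracking the max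
--     # defense seen so far (any earlier element with a larger defense necessarily
--     # has a strictly larger attack). Return-value equivalent to A; unlike A,
--     # does not sort `properties` in place.
--     order = sorted(properties, key=lambda p: [-p[0], p[1]])
--     weak = 0
--     max_def = None
--     for p in order:
--         d = p[1]
--         if max_def is not None and d < max_def:
--             weak += 1
--         if max_def is None or max_def < d:
--             max_def = d
--     return weak
-- ===== Notes on version B (the rewrite author's own statement) =====
-- stated objective: alternative
-- what changed: A sorts lexicographically and for each character rescans the tail with a nested while loop; B sorts once by (attack desc, defense asc) and counts weak characters in a single pass tracking the running maximum defense.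
-- outside the precondition, e.g. on numberOfWeakCharacters1([[5]]): A returns 0, B raises IndexError
import Mathlib
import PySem

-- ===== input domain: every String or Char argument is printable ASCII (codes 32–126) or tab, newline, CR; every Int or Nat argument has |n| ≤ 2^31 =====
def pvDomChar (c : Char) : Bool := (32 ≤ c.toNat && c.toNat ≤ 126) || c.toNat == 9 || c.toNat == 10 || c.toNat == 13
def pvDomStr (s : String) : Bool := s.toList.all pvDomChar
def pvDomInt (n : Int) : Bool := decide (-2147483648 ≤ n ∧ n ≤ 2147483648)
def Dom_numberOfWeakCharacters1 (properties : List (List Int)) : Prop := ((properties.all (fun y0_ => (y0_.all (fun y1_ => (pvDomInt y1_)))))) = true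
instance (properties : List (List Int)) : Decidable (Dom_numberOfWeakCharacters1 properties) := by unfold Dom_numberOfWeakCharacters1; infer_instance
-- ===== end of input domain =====

-- B replaces A's per-character rescan of the tail with one sort by (attack desc, defense asc)
-- and a single pass tracking the running maximum defense; equivalence is about the RETURN value
-- only (A additionally sorts its argument in place, which Lean ports cannot observe).


-- ===== PORT A =====
-- p[0] / p[1] of a character (both Pythons subscript the same way); total via pyGetD,
-- exact under Pre_ (every character has at least 2 stats).
def pvAtt (p : List Int) : Int := PySem.List.pyGetD p 0 0
def pvDef (p : List Int) : Int := PySem.List.pyGetD p 1 0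

-- the inner 'while properties[i][0] < properties[j][0]' loop, j counting down;
-- returns the 1 added by 'weak += 1; break', or 0 when the loop exits normally.
-- (At j = 0 the 'continue' branch would move Python to index -1; under Pre_ that branch
-- is unreachable — the scan always stops at an index with an attack ≤ a — so it yields 0.)
def pvWhileA (ps : List (List Int)) (a d : Int) : Nat → Int
  | 0 =>
      let q := ps.getD 0 []
      if a < pvAtt q then (if d < pvDef q then 1 else 0) else 0
  | j+1 =>
      let q := ps.getD (j+1) []
      if a < pvAtt q then (if d < pvDef q then 1 else pvWhileA ps a d j) else 0

def numberOfWeakCharacters1 (properties : List (List Int)) : Int :=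
  let ps := PySem.List.sorted properties (fun x => x)
  (List.range (ps.length - 1)).foldl
    (fun weak i =>
      let p := ps.getD i []
      weak + pvWhileA ps (pvAtt p) (pvDef p) (ps.length - 1)) 0

-- ===== PORT B =====
def numberOfWeakCharacters1_alt (properties : List (List Int)) : Int :=
  let order := PySem.List.sorted properties (fun p => [-(pvAtt p), pvDef p])
  (order.foldl
    (fun (st : Int × Option Int) p =>
      let d := pvDef p
      let w := match st.2 with
        | some m => if d < m then st.1 + 1 else st.1
        | none => st.1
      let m := match st.2 with
        | some m => if m < d then some d else some m
        | none => some d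
      (w, m)) ((0 : Int), (none : Option Int))).1

-- ===== PRECONDITION & SPEC =====
-- Pre_ excludes characters with fewer than two stats: there A either raises IndexError or
-- (degenerately, e.g. [[5]]) returns before ever reading the missing defense, while B always
-- reads p[1] and raises.
def Pre_numberOfWeakCharacters1 (properties : List (List Int)) : Prop :=
  (properties.all (fun p => 2 ≤ p.length)) = true
instance (properties : List (List Int)) : Decidable (Pre_numberOfWeakCharacters1 properties) := by unfold Pre_numberOfWeakCharacters1; infer_instance

def pvWitness_numberOfWeakCharacters1 : List (List Int) := [[1, 2], [2, 3], [1, 1]]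

def Spec_numberOfWeakCharacters1 (properties : List (List Int)) (out : Int) : Prop := out = numberOfWeakCharacters1_alt properties
instance (properties : List (List Int)) (out : Int) : Decidable (Spec_numberOfWeakCharacters1 properties out) := by unfold Spec_numberOfWeakCharacters1; infer_instance

-- ===== CLAIM (what is proved, stated in full; the proofs are below) =====
def Claim_equal_numberOfWeakCharacters1 : Prop := ∀ (properties : List (List Int)), Dom_numberOfWeakCharacters1 properties → Pre_numberOfWeakCharacters1 properties → Spec_numberOfWeakCharacters1 properties (numberOfWeakCharacters1 properties)

-- ===== LEMMAS AND PROOFS =====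

-- "p is weak in L": some member has strictly larger attack and strictly larger defense.
def pvWeakB (L : List (List Int)) (p : List Int) : Bool :=
  L.any (fun q => decide (pvAtt p < pvAtt q) && decide (pvDef p < pvDef q))

theorem pvAtt_eq (p : List Int) : pvAtt p = p.getD 0 0 := by
  simp [pvAtt, PySem.List.pyGetD_zero]

-- lexicographic ≤ on nonempty Int lists bounds the head
theorem pv_le_head {p q : List Int} (hp : p ≠ []) (h : p ≤ q) : p.getD 0 0 ≤ q.getD 0 0 := by
  cases p with
  | nil => simp_all
  | cons a t => cases q with
    | nil => exact absurd (List.Lex.nil : ([] : List Int) < a :: t) (not_lt.mpr h)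
    | cons b s =>
      rcases lt_or_eq_of_le h with h | h
      · cases h with
        | rel h => simpa using le_of_lt h
        | cons h => simp
      · injection h with h1 _; simp [h1]

-- B's sort key: ≤ on two-element Int lists, componentwise reading
theorem pv_le_pair {x1 y1 x2 y2 : Int} (h : [x1, y1] ≤ [x2, y2]) :
    x1 < x2 ∨ (x1 = x2 ∧ y1 ≤ y2) := by
  rcases lt_or_eq_of_le h with h | h
  · cases h with
    | rel h => exact Or.inl h
    | cons h => cases h with
      | rel h => exact Or.inr ⟨rfl, le_of_lt h⟩
      | cons h => cases h
  · injection h with h1 h2; injection h2 with h2 _; exact Or.inr ⟨h1, le_of_eq h2⟩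

-- (range L.length).map (getD · d) = L
theorem pv_map_range_getD {α : Type} (L : List α) (d : α) :
    (List.range L.length).map (fun i => L.getD i d) = L := by
  apply List.ext_getElem (by simp)
  intro i h1 h2
  simp only [List.getElem_map, List.getElem_range]
  exact List.getD_eq_getElem L d h2

-- the port elaborates `sorted` with core's List LT instances, the PySem order lemmas with the
-- (definitionally equal) LinearOrder-derived ones; `convert` bridges the Decidable instances
theorem pv_sorted_pairwise_port (xs : List (List Int)) (k : List Int → List Int) :
    (PySem.List.sorted xs k).Pairwise (fun a b => k a ≤ k b) := by
  have h := PySem.List.sorted_pairwise xs k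
  convert h using 2

theorem pv_pairwise_getD_mono (ps : List (List Int))
    (hpair : ps.Pairwise (fun a b : List Int => a ≤ b)) {k l : Nat}
    (hkl : k ≤ l) (hl : l < ps.length) : ps.getD k [] ≤ ps.getD l [] := by
  rcases eq_or_lt_of_le hkl with rfl | hlt
  · exact le_refl _
  · rw [List.getD_eq_getElem _ [] (by omega), List.getD_eq_getElem _ [] hl]
    exact (List.pairwise_iff_getElem.mp hpair) k l (by omega) hl hlt

-- ---- A side ----

theorem pvWhileA_spec (ps : List (List Int)) (a d : Int)
    (hmono : ∀ k l : Nat, k ≤ l → l < ps.length →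
      pvAtt (ps.getD k []) ≤ pvAtt (ps.getD l [])) :
    ∀ j : Nat, j < ps.length →
      pvWhileA ps a d j =
        if (List.range (j+1)).any
            (fun k => decide (a < pvAtt (ps.getD k [])) && decide (d < pvDef (ps.getD k [])))
          then 1 else 0 := by
  intro j
  induction j with
  | zero =>
      intro _
      simp only [pvWhileA, Nat.zero_add, List.range_one, List.any_cons, List.any_nil,
        Bool.or_false, Bool.and_eq_true, decide_eq_true_eq]
      by_cases h1 : a < pvAtt (ps.getD 0 [])
      · by_cases h2 : d < pvDef (ps.getD 0 [])
        · rw [if_pos h1, if_pos h2, if_pos ⟨h1, h2⟩]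
        · rw [if_pos h1, if_neg h2, if_neg (fun hc => h2 hc.2)]
      · rw [if_neg h1, if_neg (fun hc => h1 hc.1)]
  | succ j ih =>
      intro hj
      have hj' : j < ps.length := Nat.lt_of_succ_lt hj
      rw [List.range_succ]
      simp only [pvWhileA, List.any_append, List.any_cons, List.any_nil, Bool.or_false,
        Bool.or_eq_true, Bool.and_eq_true, decide_eq_true_eq]
      by_cases h1 : a < pvAtt (ps.getD (j+1) [])
      · by_cases h2 : d < pvDef (ps.getD (j+1) [])
        · rw [if_pos h1, if_pos h2, if_pos (Or.inr ⟨h1, h2⟩)]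
        · rw [if_pos h1, if_neg h2, ih hj']
          by_cases h3 : ((List.range (j+1)).any
              (fun k => decide (a < pvAtt (ps.getD k [])) && decide (d < pvDef (ps.getD k [])))) = true
          · rw [if_pos h3, if_pos (Or.inl h3)]
          · have hno : ¬(((List.range (j+1)).any
                (fun k => decide (a < pvAtt (ps.getD k [])) && decide (d < pvDef (ps.getD k [])))) = true
                ∨ (a < pvAtt (ps.getD (j+1) []) ∧ d < pvDef (ps.getD (j+1) []))) := by
              rintro (hx | ⟨_, hx⟩)
              exacts [h3 hx, h2 hx]
            rw [if_neg h3, if_neg hno]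
      · have hall : ∀ k, k ≤ j+1 → ¬ (a < pvAtt (ps.getD k [])) := by
          intro k hk hak
          exact h1 (lt_of_lt_of_le hak (hmono k (j+1) hk hj))
        have hnone : ¬ ((List.range (j+1)).any
            (fun k => decide (a < pvAtt (ps.getD k [])) && decide (d < pvDef (ps.getD k []))) = true) := by
          intro hx
          rw [List.any_eq_true] at hx
          obtain ⟨k, hk, hcond⟩ := hx
          rw [List.mem_range] at hk
          rw [Bool.and_eq_true, decide_eq_true_eq, decide_eq_true_eq] at hcond
          exact hall k (by omega) hcond.1
        rw [if_neg h1, if_neg (by rintro (hx | ⟨hx, _⟩); exacts [hnone hx, h1 hx])]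

theorem pvA_core (ps : List (List Int))
    (hmono : ∀ k l : Nat, k ≤ l → l < ps.length →
      pvAtt (ps.getD k []) ≤ pvAtt (ps.getD l [])) :
    (List.range (ps.length - 1)).foldl
        (fun weak i =>
          weak + pvWhileA ps (pvAtt (ps.getD i [])) (pvDef (ps.getD i [])) (ps.length - 1)) 0
      = (ps.countP (fun p => pvWeakB ps p) : Int) := by
  have hany : ∀ p : List Int,
      pvWeakB ps p = (List.range ps.length).any
        (fun k => decide (pvAtt p < pvAtt (ps.getD k [])) && decide (pvDef p < pvDef (ps.getD k []))) := by
    intro p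
    conv_lhs => rw [pvWeakB, ← pv_map_range_getD ps []]
    rw [List.any_map]
    rfl
  rcases Nat.eq_zero_or_pos ps.length with hn | hn
  · have : ps = [] := List.length_eq_zero_iff.mp hn
    simp [this]
  · have hsplit : ps.length - 1 + 1 = ps.length := Nat.succ_pred_eq_of_pos hn
    rw [PySem.List.foldl_add
      (g := fun i => pvWhileA ps (pvAtt (ps.getD i [])) (pvDef (ps.getD i [])) (ps.length - 1))]
    have hmap : ∀ i ∈ List.range (ps.length - 1),
        pvWhileA ps (pvAtt (ps.getD i [])) (pvDef (ps.getD i [])) (ps.length - 1)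
          = if pvWeakB ps (ps.getD i []) then (1 : Int) else 0 := by
      intro i _
      rw [pvWhileA_spec ps _ _ hmono (ps.length - 1) (by omega), hsplit, hany]
    rw [List.map_congr_left hmap]
    have hlast : pvWeakB ps (ps.getD (ps.length - 1) []) = false := by
      rw [hany]
      simp only [List.any_eq_false]
      intro k hk
      rw [List.mem_range] at hk
      have hle := hmono k (ps.length - 1) (by omega) (by omega)
      simp only [Bool.and_eq_true, decide_eq_true_eq, not_and]
      intro hlt
      exact absurd (lt_of_lt_of_le hlt hle) (lt_irrefl _)
    have hsum : ((List.range (ps.length - 1)).map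
          (fun i => if pvWeakB ps (ps.getD i []) then (1 : Int) else 0)).sum
        = ((List.range ps.length).map
          (fun i => if pvWeakB ps (ps.getD i []) then (1 : Int) else 0)).sum := by
      conv_rhs => rw [← hsplit, List.range_succ]
      rw [List.map_append, List.map_cons, List.map_nil, hlast]
      simp
    rw [zero_add, hsum]
    rw [show (fun i => if pvWeakB ps (ps.getD i []) then (1 : Int) else 0)
        = ((fun p => if pvWeakB ps p then (1 : Int) else 0) ∘ fun i => ps.getD i []) from rfl]
    rw [← List.map_map, pv_map_range_getD, PySem.List.sum_map_ite_one_zero]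

theorem pvA_eq_countP (properties : List (List Int))
    (hpre : Pre_numberOfWeakCharacters1 properties) :
    numberOfWeakCharacters1 properties
      = ((PySem.List.sorted properties (fun x => x)).countP
          (fun p => pvWeakB (PySem.List.sorted properties (fun x => x)) p) : Int) := by
  have hlen : ∀ p ∈ properties, 2 ≤ p.length := by
    simpa only [Pre_numberOfWeakCharacters1, List.all_eq_true, decide_eq_true_eq] using hpre
  have hpair := pv_sorted_pairwise_port properties (fun x => x)
  have hmono : ∀ k l : Nat, k ≤ l → l < (PySem.List.sorted properties (fun x => x)).length →
      pvAtt ((PySem.List.sorted properties (fun x => x)).getD k [])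
        ≤ pvAtt ((PySem.List.sorted properties (fun x => x)).getD l []) := by
    intro k l hkl hl
    rw [pvAtt_eq, pvAtt_eq]
    refine pv_le_head ?_ (pv_pairwise_getD_mono _ hpair hkl hl)
    have hk : k < (PySem.List.sorted properties (fun x => x)).length := lt_of_le_of_lt hkl hl
    rw [List.getD_eq_getElem _ [] hk]
    have hm := List.getElem_mem hk
    have h2 := hlen _ ((PySem.List.mem_sorted _ _ _ _).mp hm)
    intro h; rw [h] at h2; simp at h2
  simpa only [numberOfWeakCharacters1] using pvA_core _ hmono

-- ---- B side ----

-- running maximum defense of the processed prefix (none for the empty prefix)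
def pvMaxD : List (List Int) → Option Int
  | [] => none
  | p :: L => some ((L.map pvDef).foldl max (pvDef p))

theorem pvMaxD_eq_none {pre : List (List Int)} : pvMaxD pre = none ↔ pre = [] := by
  cases pre <;> simp [pvMaxD]

theorem pvMaxD_append (pre : List (List Int)) (p : List Int) :
    pvMaxD (pre ++ [p]) =
      some (match pvMaxD pre with
            | none => pvDef p
            | some m => max m (pvDef p)) := by
  cases pre with
  | nil => simp [pvMaxD]
  | cons q t => simp [pvMaxD, List.map_append, List.foldl_append]

theorem pv_lt_pvMaxD {pre : List (List Int)} {m d : Int} (h : pvMaxD pre = some m) :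
    (d < m) ↔ (pre.any (fun q => decide (d < pvDef q)) = true) := by
  cases pre with
  | nil => simp [pvMaxD] at h
  | cons q t =>
    simp only [pvMaxD, Option.some.injEq] at h
    subst h
    simp only [List.any_cons, List.any_eq_true, Bool.or_eq_true, decide_eq_true_eq]
    constructor
    · intro hd
      rcases PySem.List.foldl_max_mem (t.map pvDef) (pvDef q) with hm | hm
      · left; rw [← hm]; exact hd
      · rcases List.mem_map.mp hm with ⟨r, hr, hrd⟩
        right; exact ⟨r, hr, by rw [hrd]; exact hd⟩
    · rintro (hd | ⟨r, hr, hrd⟩)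
      · exact lt_of_lt_of_le hd (PySem.List.le_foldl_max (t.map pvDef) (pvDef q)).1
      · exact lt_of_lt_of_le hrd
          ((PySem.List.le_foldl_max (t.map pvDef) (pvDef q)).2 _ (List.mem_map_of_mem hr))

-- in a list sorted by (-attack, defense), the element starting a suffix is weak in the whole
-- list iff some element of the prefix has a strictly larger defense
theorem pv_head_weak (L pre rest : List (List Int)) (p : List Int)
    (hL : L = pre ++ p :: rest)
    (hpair : L.Pairwise (fun a b => [-(pvAtt a), pvDef a] ≤ [-(pvAtt b), pvDef b])) :
    pvWeakB L p = pre.any (fun q => decide (pvDef p < pvDef q)) := by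
  subst hL
  rw [List.pairwise_append] at hpair
  obtain ⟨_, hcons, hcross⟩ := hpair
  rw [List.pairwise_cons] at hcons
  rw [Bool.eq_iff_iff]
  simp only [pvWeakB, List.any_eq_true, Bool.and_eq_true, decide_eq_true_eq]
  constructor
  · rintro ⟨q, hq, h1, h2⟩
    rcases List.mem_append.mp hq with hq | hq
    · exact ⟨q, hq, h2⟩
    · rcases List.mem_cons.mp hq with rfl | hq
      · exact absurd h1 (lt_irrefl _)
      · rcases pv_le_pair (hcons.1 q hq) with hlt | ⟨heq, _⟩
        · exact absurd (by omega : pvAtt q < pvAtt p) (not_lt.mpr (le_of_lt h1))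
        · omega
  · rintro ⟨q, hq, hd⟩
    rcases pv_le_pair (hcross q hq p (List.mem_cons_self)) with hlt | ⟨_, hle⟩
    · exact ⟨q, List.mem_append_left _ hq, by omega, hd⟩
    · omega

-- B's loop body, named for the proof
def pvStepB (st : Int × Option Int) (p : List Int) : Int × Option Int :=
  let d := pvDef p
  let w := match st.2 with
    | some m => if d < m then st.1 + 1 else st.1
    | none => st.1
  let m := match st.2 with
    | some m => if m < d then some d else some m
    | none => some d
  (w, m)

theorem pvStepB_spec (L pre rest : List (List Int)) (p : List Int) (w : Int)
    (hL : L = pre ++ p :: rest)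
    (hpair : L.Pairwise (fun a b => [-(pvAtt a), pvDef a] ≤ [-(pvAtt b), pvDef b])) :
    pvStepB (w, pvMaxD pre) p
      = (w + (if pvWeakB L p then 1 else 0), pvMaxD (pre ++ [p])) := by
  have hw := pv_head_weak L pre rest p hL hpair
  cases hm : pvMaxD pre with
  | none =>
    have hpre0 : pre = [] := pvMaxD_eq_none.mp hm
    subst hpre0
    have hfalse : pvWeakB L p = false := by rw [hw]; rfl
    simp [pvStepB, pvMaxD, hfalse]
  | some m =>
    have hiff := pv_lt_pvMaxD (d := pvDef p) hm
    rw [pvMaxD_append, hm]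
    simp only [pvStepB, Prod.mk.injEq]
    by_cases hd : pvDef p < m
    · have htrue : pvWeakB L p = true := by rw [hw]; exact hiff.mp hd
      refine ⟨by rw [if_pos hd, htrue]; simp, ?_⟩
      by_cases hmd : m < pvDef p
      · exact absurd (lt_trans hd hmd) (lt_irrefl _)
      · rw [if_neg hmd, max_eq_left (not_lt.mp hmd)]
    · have hfalse : pvWeakB L p = false := by
        rw [hw]
        cases hx : pre.any (fun q => decide (pvDef p < pvDef q)) with
        | false => rfl
        | true => exact absurd (hiff.mpr hx) hd
      refine ⟨by rw [if_neg hd, hfalse]; simp, ?_⟩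
      by_cases hmd : m < pvDef p
      · rw [if_pos hmd, max_eq_right (le_of_lt hmd)]
      · rw [if_neg hmd, max_eq_left (not_lt.mp hmd)]

theorem pvFoldB (L : List (List Int))
    (hpair : L.Pairwise (fun a b => [-(pvAtt a), pvDef a] ≤ [-(pvAtt b), pvDef b])) :
    ∀ (suf pre : List (List Int)) (w : Int), L = pre ++ suf →
      (suf.foldl pvStepB (w, pvMaxD pre)).1
        = w + (suf.countP (fun p => pvWeakB L p) : Int) := by
  intro suf
  induction suf with
  | nil => intro pre w _; simp
  | cons p rest ih =>
    intro pre w hL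
    rw [List.foldl_cons, pvStepB_spec L pre rest p w hL hpair]
    rw [ih (pre ++ [p]) _ (by simpa using hL)]
    rw [List.countP_cons]
    by_cases hp : pvWeakB L p
    · simp only [hp, if_true]
      push_cast [hp]
      ring
    · simp [hp]

theorem pvB_eq_countP (properties : List (List Int)) :
    numberOfWeakCharacters1_alt properties
      = ((PySem.List.sorted properties (fun p => [-(pvAtt p), pvDef p])).countP
          (fun p => pvWeakB (PySem.List.sorted properties (fun p => [-(pvAtt p), pvDef p])) p) : Int) := by
  have halt : numberOfWeakCharacters1_alt properties
      = ((PySem.List.sorted properties (fun p => [-(pvAtt p), pvDef p])).foldl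
          pvStepB ((0 : Int), (none : Option Int))).1 := rfl
  rw [halt]
  have h := pvFoldB _ (pv_sorted_pairwise_port properties (fun p => [-(pvAtt p), pvDef p]))
    (PySem.List.sorted properties (fun p => [-(pvAtt p), pvDef p])) [] 0 rfl
  simpa only [pvMaxD, zero_add] using h

-- ---- assembly ----

theorem pvWeakB_perm (L properties : List (List Int)) (h : ∀ q, q ∈ L ↔ q ∈ properties)
    (p : List Int) : pvWeakB L p = pvWeakB properties p := by
  rw [Bool.eq_iff_iff]
  simp only [pvWeakB, List.any_eq_true]
  constructor
  · rintro ⟨q, hq, hh⟩; exact ⟨q, (h q).mp hq, hh⟩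
  · rintro ⟨q, hq, hh⟩; exact ⟨q, (h q).mpr hq, hh⟩

-- ===== VERDICT (by name: the statement is the Claim_ definition above) =====
theorem numberOfWeakCharacters1_spec : Claim_equal_numberOfWeakCharacters1 := by
  intro properties _ hpre
  unfold Spec_numberOfWeakCharacters1
  rw [pvA_eq_countP properties hpre, pvB_eq_countP]
  congr 1
  have h1 : (PySem.List.sorted properties (fun x => x)).countP
        (fun p => pvWeakB (PySem.List.sorted properties (fun x => x)) p)
      = properties.countP (fun p => pvWeakB properties p) := by
    rw [List.countP_congr (fun p _ => by
      rw [pvWeakB_perm _ properties (fun q => PySem.List.mem_sorted _ _ _ q) p])]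
    exact (PySem.List.sorted_perm properties (fun x => x) false).countP_eq _
  have h2 : (PySem.List.sorted properties (fun p => [-(pvAtt p), pvDef p])).countP
        (fun p => pvWeakB (PySem.List.sorted properties (fun p => [-(pvAtt p), pvDef p])) p)
      = properties.countP (fun p => pvWeakB properties p) := by
    rw [List.countP_congr (fun p _ => by
      rw [pvWeakB_perm _ properties (fun q => PySem.List.mem_sorted _ _ _ q) p])]
    exact (PySem.List.sorted_perm properties (fun p => [-(pvAtt p), pvDef p]) false).countP_eq _
  rw [h1, h2]
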